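-- pv_equiv track=rewrite | github.com/rez-dev/metaheuristica | FA/new basuraa/test4.py | count_unique_edges
-- ===== SOURCE A (Python) =====
-- def count_unique_edges(route1, route2):
--     edges_route1 = set(route1)
--     edges_route2 = set(route2)
--     unique_edges_route1 = edges_route1.difference(edges_route2)
--     count = len(unique_edges_route1)
--     # reverse each edge
--     reverse = set(map(lambda x: (x[1], x[0]), unique_edges_route1))
--     for edge in reverse:
--         if edge in edges_route2:
--             count -= 1
--     return count
-- ===== SOURCE B (Python) =====
-- def count_unique_edges(route1, route2):
--     blocked = sorted({e for p in route2 for e in (p, (p[1], p[0]))})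
--     uniq = sorted(set(route1))
--     i = j = 0
--     count = 0
--     while i < len(uniq):
--         if j < len(blocked) and blocked[j] < uniq[i]:
--             j += 1
--         elif j < len(blocked) and blocked[j] == uniq[i]:
--             i += 1
--         else:
--             count += 1
--             i += 1
--     return count
-- ===== Notes on version B (the rewrite author's own statement) =====
-- stated objective: alternative
-- what changed: Replaces A's hash-set difference plus a reversed-edge subtraction loop by sort-then-merge: sort the distinct edges of route1 and the sorted union of route2's edges with their reverses, then count via a two-pointer merge scan.
import Mathlib
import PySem

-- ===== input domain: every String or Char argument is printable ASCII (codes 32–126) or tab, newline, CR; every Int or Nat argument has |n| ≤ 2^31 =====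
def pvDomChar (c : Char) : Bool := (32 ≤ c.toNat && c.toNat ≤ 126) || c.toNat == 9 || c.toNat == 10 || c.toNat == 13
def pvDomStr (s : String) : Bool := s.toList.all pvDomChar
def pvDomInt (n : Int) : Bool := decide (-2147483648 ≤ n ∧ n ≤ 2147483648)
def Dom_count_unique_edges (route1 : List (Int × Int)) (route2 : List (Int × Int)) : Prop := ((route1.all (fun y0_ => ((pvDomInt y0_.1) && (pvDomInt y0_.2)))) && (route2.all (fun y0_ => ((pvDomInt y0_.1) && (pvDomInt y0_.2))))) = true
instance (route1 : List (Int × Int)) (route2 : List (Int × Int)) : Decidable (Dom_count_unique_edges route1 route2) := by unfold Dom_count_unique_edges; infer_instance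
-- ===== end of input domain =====

-- B replaces A's set-difference + reversed-edge subtraction loop by sort-then-merge: a two-pointer scan of two sorted lists (return value only; neither version mutates its arguments).


-- ===== PORT A =====
-- the loop over the set `reverse` only counts matches, so its result is iteration-order independent
def count_unique_edges (route1 : List (Int × Int)) (route2 : List (Int × Int)) : Int :=
  let edges_route1 := PySem.Set.ofList route1
  let edges_route2 := PySem.Set.ofList route2
  let unique_edges_route1 := PySem.Set.diff edges_route1 edges_route2
  let count : Int := PySem.Set.len unique_edges_route1
  let reverse := PySem.Set.ofList (unique_edges_route1.map (fun x => (x.2, x.1)))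
  reverse.foldl (fun c edge => if PySem.Set.contains edges_route2 edge then c - 1 else c) count

-- ===== PORT B =====
-- Python's '<' on int pairs: lexicographic; exact on Int × Int
def pvPairLt (a b : Int × Int) : Bool := a.1 < b.1 || (a.1 == b.1 && a.2 < b.2)

-- the while loop of Source B: state = the two remaining suffixes (uniq[i:], blocked[j:]) and the count
def pvMergeCount : List (Int × Int) → List (Int × Int) → Int → Int
  | [], _, c => c
  | _ :: as, [], c => pvMergeCount as [] (c + 1)
  | a :: as, b :: bs, c =>
    if pvPairLt b a then pvMergeCount (a :: as) bs c
    else if b == a then pvMergeCount as (b :: bs) c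
    else pvMergeCount as (b :: bs) (c + 1)
termination_by a b _ => a.length + b.length

def count_unique_edges_alt (route1 : List (Int × Int)) (route2 : List (Int × Int)) : Int :=
  let blocked := PySem.List.sorted2 (PySem.Set.ofList (route2.flatMap (fun p => [p, (p.2, p.1)]))) Prod.fst Prod.snd
  let uniq := PySem.List.sorted2 (PySem.Set.ofList route1) Prod.fst Prod.snd
  pvMergeCount uniq blocked 0

-- ===== PRECONDITION & SPEC =====
def Spec_count_unique_edges (route1 : List (Int × Int)) (route2 : List (Int × Int)) (out : Int) : Prop := out = count_unique_edges_alt route1 route2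
instance (route1 : List (Int × Int)) (route2 : List (Int × Int)) (out : Int) : Decidable (Spec_count_unique_edges route1 route2 out) := by unfold Spec_count_unique_edges; infer_instance

-- ===== CLAIM (what is proved, stated in full; the proofs are below) =====
def Claim_equal_count_unique_edges : Prop := ∀ (route1 : List (Int × Int)) (route2 : List (Int × Int)), Dom_count_unique_edges route1 route2 → Spec_count_unique_edges route1 route2 (count_unique_edges route1 route2)

-- ===== LEMMAS AND PROOFS =====

-- Python tuple '<' is the lexicographic strict order
theorem pvPairLt_iff (a b : Int × Int) : pvPairLt a b = true ↔ toLex a < toLex b := by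
  simp [pvPairLt, Prod.Lex.toLex_lt_toLex]

-- sorted2 with the two projections is sorted under the lexicographic key
theorem sorted2_eq_sorted_toLex (xs : List (Int × Int)) :
    PySem.List.sorted2 xs Prod.fst Prod.snd = PySem.List.sorted xs (fun x => toLex x) := by
  rw [PySem.List.sorted_eq_foldl_insertBy]
  unfold PySem.List.sorted2
  simp only [if_neg (by simp : ¬ (false = true))]
  have hbef : (fun a b : Int × Int => decide (a.1 < b.1) || (!decide (b.1 < a.1) && decide (a.2 < b.2)))
      = fun a b : Int × Int => decide (toLex a < toLex b) := by
    funext a b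
    simp only [Prod.Lex.toLex_lt_toLex]
    by_cases h1 : a.1 < b.1 <;> by_cases h2 : b.1 < a.1 <;> by_cases h3 : a.2 < b.2 <;>
      simp [h1, h2, h3] <;> omega
  rw [hbef]

-- sorted(set(xs)) under the lexicographic key is strictly increasing
theorem sorted_set_strict (xs : List (Int × Int)) :
    (PySem.List.sorted (PySem.Set.ofList xs) (fun x : Int × Int => toLex x)).Pairwise
      (fun a b => toLex a < toLex b) := by
  have hperm := PySem.List.sorted_perm (PySem.Set.ofList xs) (fun x : Int × Int => toLex x) false
  have hnd : (PySem.List.sorted (PySem.Set.ofList xs) (fun x : Int × Int => toLex x)).Nodup :=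
    hperm.nodup_iff.mpr (PySem.Set.nodup_ofList xs)
  have hle := PySem.List.sorted_pairwise (PySem.Set.ofList xs) (fun x : Int × Int => toLex x)
  refine (hle.and hnd).imp ?_
  rintro a b ⟨hab, hne⟩
  refine lt_of_le_of_ne hab ?_
  intro h
  exact hne (by simpa using congrArg ofLex h)

-- the merge scan counts the elements of a strictly sorted `a` absent from a strictly sorted `b`
theorem pvMergeCount_eq (a b : List (Int × Int)) (c : Int) :
    a.Pairwise (fun x y => toLex x < toLex y) → b.Pairwise (fun x y => toLex x < toLex y) →
    pvMergeCount a b c = c + (a.countP (fun x => !(b.contains x)) : Int) := by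
  induction a, b, c using pvMergeCount.induct with
  | case1 b c => intro _ _; rw [pvMergeCount]; simp
  | case2 a as c ih =>
    intro ha _
    rw [pvMergeCount, ih (ha.of_cons) (by simp)]
    simp
    ring
  | case3 a as b bs c hlt ih =>
    intro ha hb
    have hba : toLex b < toLex a := (pvPairLt_iff b a).mp hlt
    rw [pvMergeCount, if_pos hlt, ih ha hb.of_cons]
    congr 2
    apply List.countP_congr
    intro x hx
    have hbx : toLex b < toLex x := by
      rcases List.mem_cons.mp hx with rfl | hx'
      · exact hba
      · exact lt_trans hba (List.rel_of_pairwise_cons ha hx')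
    have hne : ¬ (b = x) := fun h => absurd (congrArg (toLex) h ▸ hbx) (lt_irrefl _)
    simp only [List.contains_cons, Bool.not_or, Bool.and_eq_true, Bool.not_eq_eq_eq_not,
      Bool.not_true, beq_eq_false_iff_ne, ne_eq]
    constructor
    · exact fun h => ⟨fun hxb => hne hxb.symm, h⟩
    · exact fun h => h.2
  | case4 a as b bs c hlt heq ih =>
    intro ha hb
    have hba : b = a := by simpa using heq
    rw [pvMergeCount, if_neg hlt, if_pos heq, ih ha.of_cons hb]
    subst hba
    simp [List.countP_cons]
  | case5 a as b bs c hlt hne ih =>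
    intro ha hb
    have hab : toLex a < toLex b := by
      have h1 : ¬ toLex b < toLex a := fun h => hlt ((pvPairLt_iff b a).mpr h)
      have h2 : toLex a ≠ toLex b := by
        intro h
        exact (by simpa using hne : ¬ b = a) (by simpa using congrArg ofLex h.symm)
      exact lt_of_le_of_ne (not_lt.mp h1) h2
    have hne' : ¬ (a = b) := fun h => absurd (congrArg (toLex) h ▸ hab) (lt_irrefl _)
    have hnb : a ∉ bs := fun hx' =>
      absurd (lt_trans hab (List.rel_of_pairwise_cons hb hx')) (lt_irrefl _)
    rw [pvMergeCount, if_neg hlt, if_neg hne, ih ha.of_cons hb]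
    simp [hne', hnb]
    ring

-- set(xs) of a duplicate-free list is the list itself
theorem ofList_nodup_self {α : Type} [BEq α] [LawfulBEq α] (l : List α) (h : l.Nodup) :
    PySem.Set.ofList l = l := by
  suffices H : ∀ (s : PySem.Set α), l.Nodup → (∀ x ∈ l, x ∉ s) → l.foldl PySem.Set.add s = s ++ l by
    simpa using H [] h (by simp)
  clear h
  induction l with
  | nil => intro s _ _; simp
  | cons a t ih =>
    intro s h hdisj
    have ha : a ∉ s := hdisj a (by simp)
    have hadd : PySem.Set.add s a = s ++ [a] := by
      simp [PySem.Set.add, PySem.Set.contains, List.contains_eq_mem, ha]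
    have hrest : ∀ x ∈ t, x ∉ s ++ [a] := by
      intro x hx
      simp only [List.mem_append, List.mem_singleton]
      rintro (hxs | hxa)
      · exact hdisj x (List.mem_cons_of_mem a hx) hxs
      · subst hxa; exact (List.nodup_cons.mp h).1 hx
    rw [List.foldl_cons, hadd, ih (s ++ [a]) (List.Nodup.of_cons h) hrest]
    simp

theorem foldl_sub_count (s2 : PySem.Set (Int × Int)) (r : List (Int × Int)) (c : Int) :
    r.foldl (fun c edge => if PySem.Set.contains s2 edge then c - 1 else c) c
      = c - (r.countP (fun e => PySem.Set.contains s2 e) : Int) := by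
  induction r generalizing c with
  | nil => simp
  | cons a t ih =>
    rw [List.foldl_cons, ih, List.countP_cons]
    by_cases ha : PySem.Set.contains s2 a
    · rw [if_pos ha]
      have : ((fun e => PySem.Set.contains s2 e) a = true) := ha
      rw [if_pos this]; push_cast; ring
    · rw [if_neg ha]
      have : ¬ ((fun e => PySem.Set.contains s2 e) a = true) := ha
      rw [if_neg this]; push_cast; ring

theorem countP_split (p r : Int × Int → Bool) (l : List (Int × Int)) :
    l.countP p = l.countP (fun e => p e && r e) + l.countP (fun e => p e && !r e) := by
  induction l with
  | nil => simp
  | cons a t ih =>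
    by_cases hp : p a <;> by_cases hr : r a <;>
      simp [hp, hr, ih] <;> omega

-- A's value as a single count over set(route1)
theorem count_A_eq (route1 route2 : List (Int × Int)) :
    count_unique_edges route1 route2
      = ((PySem.Set.ofList route1).countP
          (fun e => !(PySem.Set.contains (PySem.Set.ofList route2) e)
                    && !(PySem.Set.contains (PySem.Set.ofList route2) (e.2, e.1))) : Int) := by
  unfold count_unique_edges
  simp only []
  set s1 := PySem.Set.ofList route1 with hs1
  set s2 := PySem.Set.ofList route2 with hs2
  set uniq := PySem.Set.diff s1 s2 with huniq
  have hnu : uniq.Nodup := by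
    rw [huniq]; exact (PySem.Set.nodup_ofList route1).filter _
  have hmapnd : (uniq.map (fun x : Int × Int => (x.2, x.1))).Nodup :=
    hnu.map (fun a b hab => by
      cases a; cases b; simpa [Prod.ext_iff, and_comm] using hab)
  rw [ofList_nodup_self _ hmapnd, foldl_sub_count, List.countP_map]
  have hfilter : uniq = s1.filter (fun x => !PySem.Set.contains s2 x) := rfl
  have h1 : (uniq.countP ((fun e => PySem.Set.contains s2 e) ∘ fun x : Int × Int => (x.2, x.1)))
      = s1.countP (fun e => !PySem.Set.contains s2 e && PySem.Set.contains s2 (e.2, e.1)) := by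
    rw [hfilter, List.countP_filter]
    apply List.countP_congr; intro a _; simp [Function.comp, Bool.and_comm]
  have h2 : PySem.Set.len uniq = (s1.countP (fun x => !PySem.Set.contains s2 x) : Int) := by
    rw [PySem.Set.len, hfilter, List.countP_eq_length_filter]
  have h3 := countP_split (fun x : Int × Int => !PySem.Set.contains s2 x)
      (fun e : Int × Int => PySem.Set.contains s2 (e.2, e.1)) s1
  rw [h1, h2]
  omega

-- ===== VERDICT (by name: the statement is the Claim_ definition above) =====
theorem count_unique_edges_spec : Claim_equal_count_unique_edges := by
  intro route1 route2 _
  unfold Spec_count_unique_edges count_unique_edges_alt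
  simp only []
  rw [sorted2_eq_sorted_toLex, sorted2_eq_sorted_toLex]
  set S2 := PySem.Set.ofList (route2.flatMap (fun p => [p, (p.2, p.1)])) with hS2
  rw [pvMergeCount_eq _ _ _ (sorted_set_strict route1) (sorted_set_strict _), count_A_eq]
  rw [(PySem.List.sorted_perm (PySem.Set.ofList route1) (fun x : Int × Int => toLex x) false).countP_eq]
  simp only [zero_add, Int.ofNat_inj]
  apply List.countP_congr
  intro x _
  have hmemB : (PySem.List.sorted S2 (fun x : Int × Int => toLex x) false).contains x
      = S2.contains x := by
    simp only [PySem.Set.contains, List.contains_eq_mem, decide_eq_decide]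
    exact PySem.List.mem_sorted S2 (fun x : Int × Int => toLex x) false x
  have hc2 : ∀ y : Int × Int, PySem.Set.contains (PySem.Set.ofList route2) y = (y ∈ route2 : Bool) := by
    intro y
    simp [PySem.Set.contains, List.contains_eq_mem, PySem.Set.mem_ofList]
  rw [hmemB, hc2 x, hc2 (x.2, x.1)]
  have hmem : x ∈ S2 ↔ x ∈ route2 ∨ (x.2, x.1) ∈ route2 := by
    rw [hS2, PySem.Set.mem_ofList, List.mem_flatMap]
    constructor
    · rintro ⟨p, hp, hx⟩
      simp only [List.mem_cons, List.not_mem_nil, or_false] at hx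
      rcases hx with rfl | rfl
      · exact Or.inl hp
      · exact Or.inr (by simpa using hp)
    · rintro (h | h)
      · exact ⟨x, h, by simp⟩
      · exact ⟨(x.2, x.1), h, by simp⟩
  simp [PySem.Set.contains, List.contains_eq_mem, hmem]
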